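-- pv_equiv track=rewrite | github.com/DavidFM43/AoC2021 | Day_22/part_1.py | check_ranges
-- ===== SOURCE A (Python) =====
-- def check_ranges(ranges):
--     def check_bounds(c1, c2):
--         if c1 < -50 or c2 > 50:
--             return False
--         else:
--             return True
--     for coord in ranges:
--         p, q = coord
--         if not check_bounds(p, q):
--             return False
--     return True
-- ===== SOURCE B (Python) =====
-- def check_ranges(ranges):
--     if not ranges:
--         return True
--     lo = min(p for p, _ in ranges)
--     hi = max(q for _, q in ranges)
--     return lo >= -50 and hi <= 50
-- ===== Notes on version B (the rewrite author's own statement) =====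
-- stated objective: alternative
-- what changed: Instead of testing each pair with an early return, B computes the aggregate minimum of first coordinates and maximum of second coordinates (with an explicit empty guard) and decides with one final comparison.
import Mathlib
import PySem

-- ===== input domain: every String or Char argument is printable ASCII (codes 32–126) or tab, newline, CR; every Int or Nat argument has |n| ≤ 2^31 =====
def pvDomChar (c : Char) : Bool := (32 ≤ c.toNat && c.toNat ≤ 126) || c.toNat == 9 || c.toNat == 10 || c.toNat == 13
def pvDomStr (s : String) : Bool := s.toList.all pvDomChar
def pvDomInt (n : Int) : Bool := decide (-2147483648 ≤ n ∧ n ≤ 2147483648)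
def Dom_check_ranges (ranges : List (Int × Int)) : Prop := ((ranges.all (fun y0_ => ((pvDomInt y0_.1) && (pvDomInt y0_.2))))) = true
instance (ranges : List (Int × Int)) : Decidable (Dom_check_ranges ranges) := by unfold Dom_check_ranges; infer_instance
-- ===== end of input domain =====

-- B replaces A's per-pair early-return test by an aggregate min/max scan decided once at the end (alternative decomposition, same cost).


-- ===== PORT A =====
def check_bounds (c1 c2 : Int) : Bool :=
  if c1 < -50 || c2 > 50 then false else true

def check_ranges (ranges : List (Int × Int)) : Bool :=
  match ranges with
  | [] => true
  | coord :: rest =>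
    if !(check_bounds coord.1 coord.2) then false else check_ranges rest

-- ===== PORT B =====
-- B: aggregate min of first coords / max of second coords, one final comparison
def check_ranges_alt (ranges : List (Int × Int)) : Bool :=
  match ranges with
  | [] => true
  | r :: rs =>
    let lo := rs.foldl (fun m x => min m x.1) r.1
    let hi := rs.foldl (fun m x => max m x.2) r.2
    decide (lo ≥ -50) && decide (hi ≤ 50)

-- ===== PRECONDITION & SPEC =====
def Spec_check_ranges (ranges : List (Int × Int)) (out : Bool) : Prop := out = check_ranges_alt ranges
instance (ranges : List (Int × Int)) (out : Bool) : Decidable (Spec_check_ranges ranges out) := by unfold Spec_check_ranges; infer_instance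

-- ===== CLAIM (what is proved, stated in full; the proofs are below) =====
def Claim_equal_check_ranges : Prop := ∀ (ranges : List (Int × Int)), Dom_check_ranges ranges → Spec_check_ranges ranges (check_ranges ranges)

-- ===== LEMMAS AND PROOFS =====

-- ===== VERDICT (by name: the statement is the Claim_ definition above) =====
lemma foldl_min_ge (rs : List (Int × Int)) (a : Int) :
    (-50 ≤ rs.foldl (fun m x => min m x.1) a) ↔ (-50 ≤ a ∧ ∀ x ∈ rs, -50 ≤ x.1) := by
  induction rs generalizing a with
  | nil => simp
  | cons y ys ih =>
    simp only [List.foldl_cons, ih, le_min_iff, List.mem_cons]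
    constructor
    · rintro ⟨⟨h1, h2⟩, h3⟩
      exact ⟨h1, fun x hx => hx.elim (fun e => e ▸ h2) (h3 x)⟩
    · rintro ⟨h1, h2⟩
      exact ⟨⟨h1, h2 y (Or.inl rfl)⟩, fun x hx => h2 x (Or.inr hx)⟩

lemma foldl_max_le (rs : List (Int × Int)) (a : Int) :
    (rs.foldl (fun m x => max m x.2) a ≤ 50) ↔ (a ≤ 50 ∧ ∀ x ∈ rs, x.2 ≤ 50) := by
  induction rs generalizing a with
  | nil => simp
  | cons y ys ih =>
    simp only [List.foldl_cons, ih, max_le_iff, List.mem_cons]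
    constructor
    · rintro ⟨⟨h1, h2⟩, h3⟩
      exact ⟨h1, fun x hx => hx.elim (fun e => e ▸ h2) (h3 x)⟩
    · rintro ⟨h1, h2⟩
      exact ⟨⟨h1, h2 y (Or.inl rfl)⟩, fun x hx => h2 x (Or.inr hx)⟩

lemma A_eq_all (ranges : List (Int × Int)) :
    check_ranges ranges = ranges.all (fun x => decide (-50 ≤ x.1 ∧ x.2 ≤ 50)) := by
  induction ranges with
  | nil => rfl
  | cons r rs ih =>
    simp only [check_ranges, check_bounds, List.all_cons, ih]
    by_cases h1 : r.1 < -50 <;> by_cases h2 : r.2 > 50 <;>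
      simp [h1, h2] <;> omega

lemma B_eq_all (ranges : List (Int × Int)) :
    check_ranges_alt ranges = ranges.all (fun x => decide (-50 ≤ x.1 ∧ x.2 ≤ 50)) := by
  cases ranges with
  | nil => rfl
  | cons r rs =>
    simp only [check_ranges_alt, List.all_cons]
    rw [Bool.eq_iff_iff]
    simp only [Bool.and_eq_true, decide_eq_true_eq, ge_iff_le,
      foldl_min_ge, foldl_max_le, List.all_eq_true]
    constructor
    · rintro ⟨⟨h1, h2⟩, h3, h4⟩
      exact ⟨⟨h1, h3⟩, fun x hx => ⟨h2 x hx, h4 x hx⟩⟩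
    · rintro ⟨⟨h1, h3⟩, h⟩
      exact ⟨⟨h1, fun x hx => (h x hx).1⟩, h3, fun x hx => (h x hx).2⟩

theorem check_ranges_spec : Claim_equal_check_ranges := by
  intro ranges _
  unfold Spec_check_ranges
  rw [A_eq_all, B_eq_all]
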